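-- pv_equiv track=rewrite | github.com/saurabh-pandey/EPIJudgeClone | epi_judge_python/is_string_palindromic_punctuation.py | is_palindrome_v1
-- ===== SOURCE A (Python) =====
-- def is_palindrome_v1(s: str) -> bool:
--     '''
--     My O(1) version
--     '''
--     i, j = 0, len(s) - 1
--     while i < j:
--         is_i_alphanum = s[i].isalnum()
--         is_j_alphanum = s[j].isalnum()
--         if is_i_alphanum and is_j_alphanum:
--             if s[i].lower() != s[j].lower():
--                 return False
--             else:
--                 i += 1
--                 j -= 1
--         if not is_i_alphanum:
--             i += 1
--         if not is_j_alphanum: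
--             j -= 1
--     return True
-- ===== SOURCE B (Python) =====
-- def is_palindrome_v1(s: str) -> bool:
--     '''
--     Filter-then-compare: build the lowercased alphanumeric sequence, compare with its reverse
--     '''
--     cleaned = [c.lower() for c in s if c.isalnum()]
--     return cleaned == cleaned[::-1]
-- ===== Notes on version B (the rewrite author's own statement) =====
-- stated objective: idiomatic
-- what changed: Replaces the interleaved two-pointer scan with conditional index advancement by a single filter/lowercase pass followed by comparing the cleaned list with its reverse.
import Mathlib
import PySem

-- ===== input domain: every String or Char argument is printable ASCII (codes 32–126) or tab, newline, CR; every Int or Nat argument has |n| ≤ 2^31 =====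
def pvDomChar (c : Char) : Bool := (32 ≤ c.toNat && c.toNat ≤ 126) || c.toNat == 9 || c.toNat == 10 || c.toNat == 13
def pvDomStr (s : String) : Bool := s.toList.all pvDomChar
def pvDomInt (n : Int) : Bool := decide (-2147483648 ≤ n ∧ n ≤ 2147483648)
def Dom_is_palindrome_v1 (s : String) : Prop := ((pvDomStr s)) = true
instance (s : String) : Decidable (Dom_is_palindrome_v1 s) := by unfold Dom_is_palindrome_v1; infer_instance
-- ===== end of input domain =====

-- B replaces A's two-pointer scan by "filter lowercased alphanumerics, compare with reverse" (idiomatic decomposition; no speed claim).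


-- ===== PORT A =====
-- the while loop of A; indices always stay in range (0 ≤ i < j ≤ len-1), so s[i]/s[j] are pyGetD under that invariant
def palLoopA (cs : List Char) (i j : Int) : Bool :=
  if h : i < j then
    let ci := PySem.List.pyGetD cs i ' '
    let cj := PySem.List.pyGetD cs j ' '
    let is_i_alphanum := PySem.Chars.isalnum ci
    let is_j_alphanum := PySem.Chars.isalnum cj
    if is_i_alphanum && is_j_alphanum then
      if PySem.Chars.lowerChar ci ≠ PySem.Chars.lowerChar cj then false
      else palLoopA cs (i + 1) (j - 1)
    else
      palLoopA cs (if is_i_alphanum then i else i + 1) (if is_j_alphanum then j else j - 1)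
  else true
termination_by (j - i).toNat
decreasing_by
  · omega
  · rename_i hia
    simp only [Bool.and_eq_true, not_and] at hia
    split_ifs with h1 h2 h2 <;> first
      | exact absurd h1 (hia h2)
      | omega

def is_palindrome_v1 (s : String) : Bool :=
  palLoopA s.toList 0 (PySem.Str.len s - 1)

-- ===== PORT B =====
def is_palindrome_v1_alt (s : String) : Bool :=
  let cleaned := (s.toList.filter PySem.Chars.isalnum).map PySem.Chars.lowerChar
  cleaned == cleaned.reverse

-- ===== PRECONDITION & SPEC =====
def Spec_is_palindrome_v1 (s : String) (out : Bool) : Prop := out = is_palindrome_v1_alt s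
instance (s : String) (out : Bool) : Decidable (Spec_is_palindrome_v1 s out) := by unfold Spec_is_palindrome_v1; infer_instance

-- ===== CLAIM (what is proved, stated in full; the proofs are below) =====
def Claim_equal_is_palindrome_v1 : Prop := ∀ (s : String), Dom_is_palindrome_v1 s → Spec_is_palindrome_v1 s (is_palindrome_v1 s)

-- ===== LEMMAS AND PROOFS =====

-- the lowercased alphanumeric content of a list of characters
def cleanC (l : List Char) : List Char := (l.filter PySem.Chars.isalnum).map PySem.Chars.lowerChar

theorem cleanC_nil : cleanC [] = [] := rfl

theorem cleanC_cons (a : Char) (l : List Char) :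
    cleanC (a :: l) = if PySem.Chars.isalnum a then PySem.Chars.lowerChar a :: cleanC l else cleanC l := by
  by_cases h : PySem.Chars.isalnum a <;> simp [cleanC, h]

theorem cleanC_append (l₁ l₂ : List Char) : cleanC (l₁ ++ l₂) = cleanC l₁ ++ cleanC l₂ := by
  simp [cleanC]

theorem short_palin {l : List Char} (h : l.length ≤ 1) : l = l.reverse := by
  match l, h with
  | [], _ => rfl
  | [a], _ => rfl

theorem sandwich_palin (a b : Char) (xs : List Char) :
    (a :: (xs ++ [b]) = (a :: (xs ++ [b])).reverse) ↔ (a = b ∧ xs = xs.reverse) := by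
  constructor
  · intro h
    simp only [List.reverse_cons, List.reverse_append, List.reverse_cons, List.reverse_nil,
      List.nil_append, List.cons_append, List.cons.injEq] at h
    obtain ⟨hab, htail⟩ := h
    refine ⟨hab, ?_⟩
    have := List.append_cancel_right (htail.trans (by rw [hab]) : xs ++ [b] = xs.reverse ++ [b])
    exact this
  · rintro ⟨rfl, hxs⟩
    conv_lhs => rw [hxs]
    simp

-- the loop computes "cleaned segment equals its reverse" on the segment cs[i..j]
theorem palLoopA_eq (cs : List Char) :
    ∀ (d i j : Nat), j < cs.length → j - i ≤ d →
      palLoopA cs (i : Int) (j : Int) =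
        decide (cleanC ((cs.take (j+1)).drop i) = (cleanC ((cs.take (j+1)).drop i)).reverse) := by
  intro d
  induction d with
  | zero =>
    intro i j hj hd
    rw [palLoopA]
    have hij : ¬ ((i : Int) < (j : Int)) := by exact_mod_cast Nat.not_lt.mpr (by omega)
    rw [dif_neg hij]
    have hlen : ((cs.take (j+1)).drop i).length ≤ 1 := by
      simp only [List.length_drop, List.length_take]
      omega
    have hclen : (cleanC ((cs.take (j+1)).drop i)).length ≤ 1 := by
      calc (cleanC ((cs.take (j+1)).drop i)).length
          = (((cs.take (j+1)).drop i).filter PySem.Chars.isalnum).length := by simp [cleanC]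
        _ ≤ ((cs.take (j+1)).drop i).length := List.length_filter_le _ _
        _ ≤ 1 := hlen
    exact (decide_eq_true (short_palin hclen)).symm
  | succ d ih =>
    intro i j hj hd
    rw [palLoopA]
    by_cases hij : i < j
    · rw [dif_pos (by exact_mod_cast hij)]
      have hi : i < cs.length := by omega
      have hgi : PySem.List.pyGetD cs (i : Int) ' ' = cs[i] := by
        rw [PySem.List.pyGetD_natCast]; exact List.getD_eq_getElem cs ' ' hi
      have hgj : PySem.List.pyGetD cs (j : Int) ' ' = cs[j] := by
        rw [PySem.List.pyGetD_natCast]; exact List.getD_eq_getElem cs ' ' hj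
      -- segment decompositions
      have hsegL : (cs.take (j+1)).drop i = cs[i] :: (cs.take (j+1)).drop (i+1) := by
        have h1 : i < (cs.take (j+1)).length := by simp [List.length_take]; omega
        rw [List.drop_eq_getElem_cons h1, List.getElem_take]
      have htake : cs.take (j+1) = cs.take j ++ [cs[j]] := by
        rw [List.take_add_one, List.getElem?_eq_getElem hj]; rfl
      have hsegR : ∀ k, k ≤ j → (cs.take (j+1)).drop k = (cs.take j).drop k ++ [cs[j]] := by
        intro k hk
        rw [htake, List.drop_append_of_le_length (by simp [List.length_take]; omega)]
      simp only [hgi, hgj]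
      by_cases hia : PySem.Chars.isalnum cs[i] = true <;>
        by_cases hja : PySem.Chars.isalnum cs[j] = true
      · -- both alphanumeric
        simp only [hia, hja, Bool.and_self, if_true]
        -- middle segment: cs[i+1..j-1]
        have hmid : (cs.take (j+1)).drop i =
            cs[i] :: (((cs.take j).drop (i+1)) ++ [cs[j]]) := by
          rw [hsegL, hsegR (i+1) (by omega)]
        by_cases hne : PySem.Chars.lowerChar cs[i] ≠ PySem.Chars.lowerChar cs[j]
        · rw [if_pos hne]
          rw [hmid, cleanC_cons, if_pos hia, cleanC_append, cleanC_cons, if_pos hja, cleanC_nil]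
          rw [eq_comm, decide_eq_false_iff_not]
          rw [sandwich_palin]
          tauto
        · rw [if_neg hne]
          rw [not_not] at hne
          have hj1 : ((j : Int) - 1) = ((j - 1 : Nat) : Int) := by omega
          have hi1 : ((i : Int) + 1) = ((i + 1 : Nat) : Int) := by omega
          rw [hi1, hj1, ih (i+1) (j-1) (by omega) (by omega)]
          have : j - 1 + 1 = j := by omega
          rw [this]
          rw [hmid, cleanC_cons, if_pos hia, cleanC_append, cleanC_cons, if_pos hja, cleanC_nil]
          rw [decide_eq_decide, sandwich_palin]
          simp [hne]
      · -- i alnum, j not: j -= 1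
        have hja' : PySem.Chars.isalnum cs[j] = false := by simpa using hja
        simp only [hia, hja', Bool.and_false, Bool.false_eq_true, if_false, if_true]
        have hj1 : ((j : Int) - 1) = ((j - 1 : Nat) : Int) := by omega
        rw [hj1, ih i (j-1) (by omega) (by omega)]
        have hjj : j - 1 + 1 = j := by omega
        rw [hjj]
        have : (cs.take (j+1)).drop i = (cs.take j).drop i ++ [cs[j]] := hsegR i (by omega)
        rw [this, cleanC_append, cleanC_cons, if_neg (by simp [hja]), cleanC_nil, List.append_nil]
      · -- j alnum, i not: i += 1
        have hia' : PySem.Chars.isalnum cs[i] = false := by simpa using hia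
        simp only [hia', hja, Bool.false_and, Bool.false_eq_true, if_false, if_true]
        have hi1 : ((i : Int) + 1) = ((i + 1 : Nat) : Int) := by omega
        rw [hi1, ih (i+1) j (by omega) (by omega)]
        rw [hsegL, cleanC_cons, if_neg (by simp [hia])]
      · -- neither: i += 1, j -= 1
        have hia' : PySem.Chars.isalnum cs[i] = false := by simpa using hia
        have hja' : PySem.Chars.isalnum cs[j] = false := by simpa using hja
        simp only [hia', hja', Bool.false_and, Bool.false_eq_true, if_false]
        have hi1 : ((i : Int) + 1) = ((i + 1 : Nat) : Int) := by omega
        have hj1 : ((j : Int) - 1) = ((j - 1 : Nat) : Int) := by omega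
        rw [hi1, hj1,
          ih (i+1) (j-1) (by omega) (by omega)]
        have hjj : j - 1 + 1 = j := by omega
        rw [hjj]
        rw [hsegL, hsegR (i+1) (by omega), cleanC_cons, if_neg (by simp [hia]),
          cleanC_append, cleanC_cons, if_neg (by simp [hja]), cleanC_nil, List.append_nil]
    · rw [dif_neg (by exact_mod_cast hij)]
      have hlen : ((cs.take (j+1)).drop i).length ≤ 1 := by
        simp only [List.length_drop, List.length_take]; omega
      have hclen : (cleanC ((cs.take (j+1)).drop i)).length ≤ 1 := by
        calc (cleanC ((cs.take (j+1)).drop i)).length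
            = (((cs.take (j+1)).drop i).filter PySem.Chars.isalnum).length := by simp [cleanC]
          _ ≤ ((cs.take (j+1)).drop i).length := List.length_filter_le _ _
          _ ≤ 1 := hlen
      exact (decide_eq_true (short_palin hclen)).symm

-- ===== VERDICT (by name: the statement is the Claim_ definition above) =====
theorem is_palindrome_v1_spec : Claim_equal_is_palindrome_v1 := by
  intro s _
  unfold Spec_is_palindrome_v1 is_palindrome_v1 is_palindrome_v1_alt
  by_cases hnil : s.toList = []
  · rw [palLoopA]
    rw [dif_neg (by simp [PySem.Str.len_eq, hnil])]
    simp [hnil]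
  · have hlenpos : 1 ≤ s.toList.length := List.length_pos_of_ne_nil hnil
    have hcast : (PySem.Str.len s - 1) = ((s.toList.length - 1 : Nat) : Int) := by
      rw [PySem.Str.len_eq]; omega
    rw [hcast]
    have h0 : (0 : Int) = ((0 : Nat) : Int) := rfl
    rw [h0, palLoopA_eq s.toList (s.toList.length) 0 (s.toList.length - 1) (by omega) (by omega)]
    have : s.toList.length - 1 + 1 = s.toList.length := by omega
    rw [this, List.take_length, List.drop_zero]
    simp only [cleanC]
    exact Eq.symm (Bool.beq_eq_decide_eq _ _)
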